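-- pv_equiv track=rewrite | github.com/PaulusKlaus/Master-tesis | data_utils/CWRU.py | find_de_channel_key
-- ===== SOURCE A (Python) =====
-- def find_de_channel_key(mat_dict: dict):
--     """
--     Try to find the Drive End channel key. Robust to keys like:
--     'X012_DE_time', 'DE_time', 'DE', 'DE_time_1', etc.
--     Returns the key or None if not found.
--     """
--     keys = [k for k in mat_dict.keys() if not k.startswith('__')]
--     # Prefer exact-ish DE matches first
--     for k in keys:
--         low = k.lower()
--         if 'de' in low and ('time' in low or low.endswith('de') or '_de_' in low):
--             return k
--     # Fall back to anything containing 'de'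
--     for k in keys:
--         if 'de' in k.lower():
--             return k
--     return None
-- ===== SOURCE B (Python) =====
-- def find_de_channel_key(mat_dict: dict):
--     """Single pass: return the first strong DE match immediately, remembering
--     the first weak 'de'-containing key as a fallback."""
--     fallback = None
--     for k in mat_dict.keys():
--         if k.startswith('__'):
--             continue
--         low = k.lower()
--         if 'de' in low:
--             if 'time' in low or low.endswith('de') or '_de_' in low:
--                 return k
--             if fallback is None:
--                 fallback = k
--     return fallback
-- ===== Notes on version B (the rewrite author's own statement) =====
-- stated objective: simpler
-- what changed: Replaces A's two sequential scans (strong match, then weak fallback) with one pass over the keys that returns a strong match immediately and records the first weak match in a fallback variable.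
import Mathlib
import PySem

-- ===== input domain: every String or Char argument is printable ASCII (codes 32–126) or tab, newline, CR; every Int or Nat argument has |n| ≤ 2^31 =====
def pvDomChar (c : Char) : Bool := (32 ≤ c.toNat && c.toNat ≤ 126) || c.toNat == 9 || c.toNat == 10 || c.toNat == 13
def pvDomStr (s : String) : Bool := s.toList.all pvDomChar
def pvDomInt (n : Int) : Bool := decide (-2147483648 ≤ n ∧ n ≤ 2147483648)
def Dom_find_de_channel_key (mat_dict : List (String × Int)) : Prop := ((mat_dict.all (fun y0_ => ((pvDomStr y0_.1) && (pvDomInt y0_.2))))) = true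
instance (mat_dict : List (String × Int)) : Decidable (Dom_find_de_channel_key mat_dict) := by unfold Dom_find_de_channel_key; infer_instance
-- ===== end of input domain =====

-- B merges A's two sequential scans into one pass that keeps a first-weak-match fallback; objective: simpler.


-- ===== PORT A =====
-- not k.startswith('__')
def notDunder (k : String) : Bool := !PySem.Str.startswith k "__"

-- 'de' in k.lower()
def deWeak (k : String) : Bool := PySem.Str.isIn "de" (PySem.Str.lower k)

-- 'time' in low or low.endswith('de') or '_de_' in low   (for low = k.lower())
def deStrongRest (k : String) : Bool :=
  PySem.Str.isIn "time" (PySem.Str.lower k) ||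
    PySem.Str.endswith (PySem.Str.lower k) "de" ||
    PySem.Str.isIn "_de_" (PySem.Str.lower k)

-- 'de' in low and ('time' in low or low.endswith('de') or '_de_' in low)
def deStrong (k : String) : Bool := deWeak k && deStrongRest k

def find_de_channel_key (mat_dict : List (String × Int)) : Option String :=
  let keys := (PySem.Dict.ofList mat_dict).keys.filter notDunder
  match keys.find? deStrong with
  | some k => some k
  | none =>
    match keys.find? deWeak with
    | some k => some k
    | none => none

-- ===== PORT B =====
-- one pass over the keys, keeping the first weak match as a fallback
def altGo (ks : List String) (fb : Option String) : Option String :=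
  match ks with
  | [] => fb
  | k :: rest =>
    if notDunder k then
      if deWeak k then
        if deStrongRest k then some k
        else altGo rest (if fb.isNone then some k else fb)
      else altGo rest fb
    else altGo rest fb

def find_de_channel_key_alt (mat_dict : List (String × Int)) : Option String :=
  altGo (PySem.Dict.ofList mat_dict).keys none

-- ===== PRECONDITION & SPEC =====
def Spec_find_de_channel_key (mat_dict : List (String × Int)) (out : Option String) : Prop := out = find_de_channel_key_alt mat_dict
instance (mat_dict : List (String × Int)) (out : Option String) : Decidable (Spec_find_de_channel_key mat_dict out) := by unfold Spec_find_de_channel_key; infer_instance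

-- ===== CLAIM (what is proved, stated in full; the proofs are below) =====
def Claim_equal_find_de_channel_key : Prop := ∀ (mat_dict : List (String × Int)), Dom_find_de_channel_key mat_dict → Spec_find_de_channel_key mat_dict (find_de_channel_key mat_dict)

-- ===== LEMMAS AND PROOFS =====
theorem altGo_eq (ks : List String) (fb : Option String) :
    altGo ks fb =
      (ks.find? (fun a => notDunder a && deStrong a)).or
        (fb.or (ks.find? (fun a => notDunder a && deWeak a))) := by
  induction ks generalizing fb with
  | nil => simp [altGo]
  | cons k rest ih =>
    simp only [altGo]
    by_cases hnd : notDunder k = true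
    · rw [if_pos hnd]
      by_cases hw : deWeak k = true
      · rw [if_pos hw]
        by_cases hr : deStrongRest k = true
        · rw [if_pos hr,
            List.find?_cons_of_pos (by simp [deStrong, hnd, hw, hr])]
          simp
        · rw [if_neg hr, ih,
            List.find?_cons_of_neg (by simp [deStrong, hr]),
            List.find?_cons_of_pos (p := fun a => notDunder a && deWeak a) (by simp [hnd, hw])]
          cases fb <;> simp
      · rw [if_neg hw, ih,
          List.find?_cons_of_neg (by simp [deStrong, hw]),
          List.find?_cons_of_neg (by simp [hw])]
    · rw [if_neg hnd, ih,
        List.find?_cons_of_neg (by simp [hnd]),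
        List.find?_cons_of_neg (by simp [hnd])]

-- ===== VERDICT (by name: the statement is the Claim_ definition above) =====
theorem find_de_channel_key_spec : Claim_equal_find_de_channel_key := by
  intro mat_dict _
  unfold Spec_find_de_channel_key find_de_channel_key find_de_channel_key_alt
  rw [altGo_eq]
  simp only [List.find?_filter]
  cases h1 : (PySem.Dict.ofList mat_dict).keys.find? (fun a => notDunder a && deStrong a) with
  | some k => simp [h1]
  | none =>
    cases h2 : (PySem.Dict.ofList mat_dict).keys.find? (fun a => notDunder a && deWeak a) with
    | some k => simp [h1, h2]
    | none => simp [h1, h2]
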